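-- pv_equiv track=rewrite | github.com/PawelPohland/code-challenges | 008/008.py | sum_missing_nums
-- ===== SOURCE A (Python) =====
-- def sum_missing_nums(numbers):
--     total = 0
--     index = 0
--
--     while index < len(numbers):
--         first_num = numbers[index]
--
--         index += 1
--
--         if index >= len(numbers):
--             break
--
--         second_num = numbers[index]
--
--         for num in range(first_num + 1, second_num, 1):
--             total += num
--
--     return total
-- ===== SOURCE B (Python) =====
-- def sum_missing_nums(numbers):
--     total = 0
--     for a, b in zip(numbers, numbers[1:]):
--         k = b - a - 1
--         if k > 0:
--             total += k * (a + b) // 2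
--     return total
-- ===== Notes on version B (the rewrite author's own statement) =====
-- stated objective: faster
-- what changed: Replaced the per-gap inner loop that adds every integer between each consecutive pair with a closed-form arithmetic-series formula per pair, folded over zipped adjacent pairs.
import Mathlib
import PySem

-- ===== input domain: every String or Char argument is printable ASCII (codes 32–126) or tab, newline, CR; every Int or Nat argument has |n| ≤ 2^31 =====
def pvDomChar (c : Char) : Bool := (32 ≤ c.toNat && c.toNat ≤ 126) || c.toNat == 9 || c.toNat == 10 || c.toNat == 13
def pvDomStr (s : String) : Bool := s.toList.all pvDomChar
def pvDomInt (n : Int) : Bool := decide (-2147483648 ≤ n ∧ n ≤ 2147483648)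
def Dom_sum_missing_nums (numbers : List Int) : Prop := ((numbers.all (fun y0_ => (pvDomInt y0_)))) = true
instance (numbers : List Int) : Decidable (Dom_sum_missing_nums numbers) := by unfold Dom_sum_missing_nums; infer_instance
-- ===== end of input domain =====

-- B replaces A's per-gap inner summation loop with a closed-form arithmetic-series
-- formula folded over zipped adjacent pairs (objective: faster).


-- ===== PORT A =====
-- the while loop of A: index-based, inner 'for num in range(first+1, second, 1)'
def sumMissingLoopA (numbers : List Int) (total : Int) (index : Nat) : Int :=
  if h : index < numbers.length then
    let first := numbers[index]
    if h2 : index + 1 < numbers.length then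
      let second := numbers[index + 1]
      sumMissingLoopA numbers
        ((PySem.List.pyRange (first + 1) second 1).foldl (· + ·) total) (index + 1)
    else total
  else total
  termination_by numbers.length - index

def sum_missing_nums (numbers : List Int) : Int :=
  sumMissingLoopA numbers 0 0

-- ===== PORT B =====
def sum_missing_nums_alt (numbers : List Int) : Int :=
  (numbers.zip (PySem.List.slice numbers (some 1) none)).foldl
    (fun total p =>
      let k := p.2 - p.1 - 1
      if k > 0 then total + PySem.Int.floordiv (k * (p.1 + p.2)) 2 else total) 0

-- ===== PRECONDITION & SPEC =====
def Spec_sum_missing_nums (numbers : List Int) (out : Int) : Prop := out = sum_missing_nums_alt numbers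
instance (numbers : List Int) (out : Int) : Decidable (Spec_sum_missing_nums numbers out) := by unfold Spec_sum_missing_nums; infer_instance

-- ===== CLAIM (what is proved, stated in full; the proofs are below) =====
def Claim_equal_sum_missing_nums : Prop := ∀ (numbers : List Int), Dom_sum_missing_nums numbers → Spec_sum_missing_nums numbers (sum_missing_nums numbers)

-- ===== LEMMAS AND PROOFS =====

-- closed-form gap value for one adjacent pair
def pvGap (a b : Int) : Int :=
  if b - a - 1 > 0 then PySem.Int.floordiv ((b - a - 1) * (a + b)) 2 else 0

def pvPairs : List Int → Int
  | a :: b :: rest => pvGap a b + pvPairs (b :: rest)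
  | _ => 0

theorem pvFoldlAddInt (l : List Int) (t : Int) : l.foldl (· + ·) t = t + l.foldl (· + ·) 0 := by
  induction l generalizing t with
  | nil => simp
  | cons x xs ih => simp only [List.foldl_cons]; rw [ih (t + x), ih (0 + x)]; ring

theorem pvTwiceSumRange (a b : Int) (h : a ≤ b) :
    2 * (PySem.List.pyRange a b 1).foldl (· + ·) 0 = (b - a) * (a + b - 1) := by
  obtain ⟨n, hn⟩ : ∃ n : Nat, b = a + n := ⟨(b - a).toNat, by omega⟩
  subst hn
  induction n with
  | zero => simp [PySem.List.pyRange_one_eq_nil]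
  | succ m ih =>
    have hm : a ≤ a + (m : Int) := by omega
    rw [show ((m + 1 : Nat) : Int) = (m : Int) + 1 by push_cast; ring,
        ← add_assoc, PySem.List.pyRange_one_succ_right hm]
    rw [List.foldl_append, List.foldl_cons, List.foldl_nil, pvFoldlAddInt]
    rw [mul_add, zero_add, ih hm]
    ring

theorem pvRangeFoldGap (a b t : Int) :
    (PySem.List.pyRange (a + 1) b 1).foldl (· + ·) t = t + pvGap a b := by
  rw [pvFoldlAddInt, pvGap]
  split_ifs with h
  · have h1 : a + 1 ≤ b := by omega
    have h2 := pvTwiceSumRange (a + 1) b h1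
    have heq : (b - (a + 1)) * (a + 1 + b - 1) = (b - a - 1) * (a + b) := by ring
    rw [heq] at h2
    rw [← h2, PySem.Int.floordiv_eq_ediv_of_pos (by omega)]
    omega
  · rw [PySem.List.pyRange_one_eq_nil (by omega)]
    simp

theorem pvALoopEq (numbers : List Int) :
    ∀ fuel index total, numbers.length - index ≤ fuel →
      sumMissingLoopA numbers total index = total + pvPairs (numbers.drop index) := by
  intro fuel
  induction fuel with
  | zero =>
    intro index total h
    rw [sumMissingLoopA]
    have hge : numbers.length ≤ index := by omega
    rw [List.drop_eq_nil_of_le hge]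
    simp [pvPairs, Nat.not_lt_of_le hge]
  | succ m ih =>
    intro index total h
    rw [sumMissingLoopA]
    by_cases h1 : index < numbers.length
    · have hd1 : numbers.drop index = numbers[index] :: numbers.drop (index + 1) :=
        List.drop_eq_getElem_cons h1
      by_cases h2 : index + 1 < numbers.length
      · have hd2 : numbers.drop (index + 1) = numbers[index + 1] :: numbers.drop (index + 2) :=
          List.drop_eq_getElem_cons h2
        simp only [h1, h2, dif_pos]
        rw [ih (index + 1) _ (by omega), pvRangeFoldGap, hd1, hd2, pvPairs, ← hd2]
        ring
      · simp only [h1, h2, dif_pos]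
        have h3 : numbers.drop (index + 1) = [] := List.drop_eq_nil_of_le (by omega)
        rw [hd1, h3, show pvPairs [numbers[index]] = 0 from rfl]
        simp
    · rw [List.drop_eq_nil_of_le (by omega)]
      simp [pvPairs, h1]

theorem pvBFoldEq : ∀ (l : List Int) (t : Int),
    (l.zip (l.drop 1)).foldl
      (fun total p =>
        let k := p.2 - p.1 - 1
        if k > 0 then total + PySem.Int.floordiv (k * (p.1 + p.2)) 2 else total) t
      = t + pvPairs l := by
  intro l
  induction l with
  | nil => intro t; simp [pvPairs]
  | cons a l ih =>
    intro t
    cases l with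
    | nil => simp [pvPairs]
    | cons b rest =>
      simp only [List.drop_succ_cons, List.drop_zero, List.zip_cons_cons, List.foldl_cons]
      rw [show (b :: rest).drop 1 = rest from rfl] at ih
      rw [ih, pvPairs]
      have : (if b - a - 1 > 0 then t + PySem.Int.floordiv ((b - a - 1) * (a + b)) 2 else t)
          = t + pvGap a b := by
        rw [pvGap]; split_ifs <;> ring
      simp only [this]
      ring

-- ===== VERDICT (by name: the statement is the Claim_ definition above) =====
theorem sum_missing_nums_spec : Claim_equal_sum_missing_nums := by
  intro numbers _
  unfold Spec_sum_missing_nums sum_missing_nums sum_missing_nums_alt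
  rw [pvALoopEq numbers numbers.length 0 0 (by omega), List.drop_zero]
  rw [PySem.List.slice_from_one, ← List.drop_one]
  rw [pvBFoldEq]
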